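-- pv_equiv track=rewrite | github.com/ManjunathReddy078/ClarifAI-Capstone | 01_Code/backend/routes/faculty.py | _normalize_task_indexes
-- ===== SOURCE A (Python) =====
-- def _normalize_task_indexes(raw_indexes, total_tasks: int):
-- 	if total_tasks <= 0:
-- 		return []
-- 	if not isinstance(raw_indexes, list):
-- 		return []
-- 	normalized = set()
-- 	for raw in raw_indexes:
-- 		try:
-- 			idx = int(raw)
-- 		except (TypeError, ValueError):
-- 			continue
-- 		if 0 <= idx < total_tasks:
-- 			normalized.add(idx)
-- 	return sorted(normalized)
-- ===== SOURCE B (Python) =====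
-- def _merge_unique(xs, ys):
-- 	out = []
-- 	i = 0
-- 	j = 0
-- 	while i < len(xs) and j < len(ys):
-- 		x = xs[i]
-- 		y = ys[j]
-- 		if x < y:
-- 			out.append(x)
-- 			i += 1
-- 		elif y < x:
-- 			out.append(y)
-- 			j += 1
-- 		else:
-- 			out.append(x)
-- 			i += 1
-- 			j += 1
-- 	out.extend(xs[i:])
-- 	out.extend(ys[j:])
-- 	return out
--
--
-- def _sorted_unique(vals):
-- 	if len(vals) <= 1:
-- 		return vals
-- 	mid = len(vals) // 2
-- 	return _merge_unique(_sorted_unique(vals[:mid]), _sorted_unique(vals[mid:]))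
--
--
-- def _normalize_task_indexes(raw_indexes, total_tasks: int):
-- 	if total_tasks <= 0:
-- 		return []
-- 	if not isinstance(raw_indexes, list):
-- 		return []
-- 	vals = []
-- 	for raw in raw_indexes:
-- 		try:
-- 			idx = int(raw)
-- 		except (TypeError, ValueError):
-- 			continue
-- 		if 0 <= idx < total_tasks:
-- 			vals.append(idx)
-- 	return _sorted_unique(vals)
-- ===== Notes on version B (the rewrite author's own statement) =====
-- stated objective: alternative
-- what changed: B replaces A's hash-set accumulation plus library sorted() with a hand-written divide-and-conquer merge sort whose merge step drops equal elements, so sorting and deduplication happen together in the merges and no set is built.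
import Mathlib
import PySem

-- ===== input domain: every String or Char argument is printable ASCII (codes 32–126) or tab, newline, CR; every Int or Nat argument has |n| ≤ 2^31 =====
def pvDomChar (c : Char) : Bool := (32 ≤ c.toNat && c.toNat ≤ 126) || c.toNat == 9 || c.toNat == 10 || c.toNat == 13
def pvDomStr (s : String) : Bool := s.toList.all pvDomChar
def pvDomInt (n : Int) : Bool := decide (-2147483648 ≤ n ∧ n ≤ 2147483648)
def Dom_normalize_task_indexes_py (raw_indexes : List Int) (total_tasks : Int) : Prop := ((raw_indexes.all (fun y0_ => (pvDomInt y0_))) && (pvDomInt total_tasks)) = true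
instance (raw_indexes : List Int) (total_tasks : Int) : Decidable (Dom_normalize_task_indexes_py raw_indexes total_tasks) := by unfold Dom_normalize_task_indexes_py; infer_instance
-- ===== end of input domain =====

-- B sorts-and-dedups the filtered indexes with a hand-written merge sort whose merge drops
-- equal elements, instead of A's set + library sorted(); same cost, different algorithm.
-- On List Int inputs the isinstance(list) guard is always true and int(raw) is the identity and
-- never raises, so both ports omit the guard and the try/except.

-- shared helper: the Python test '0 <= idx < total_tasks'
def pvInRange (total_tasks raw : Int) : Bool := decide (0 ≤ raw) && decide (raw < total_tasks)

-- ===== PORT A =====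
def normalize_task_indexes_py (raw_indexes : List Int) (total_tasks : Int) : List Int :=
  if total_tasks ≤ 0 then []
  else
    let normalized : PySem.Set Int :=
      raw_indexes.foldl (fun s raw => if pvInRange total_tasks raw then PySem.Set.add s raw else s)
        PySem.Set.empty
    PySem.List.sorted normalized (fun x => x)

-- ===== PORT B =====
-- B's _merge_unique while loop, as structural recursion on the two remaining suffixes
-- (out.append = cons, out.extend of the leftover slice = the remaining suffix)
def mergeUnique : List Int → List Int → List Int
  | [], ys => ys
  | x :: xs, [] => x :: xs
  | x :: xs, y :: ys =>
    if x < y then x :: mergeUnique xs (y :: ys)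
    else if y < x then y :: mergeUnique (x :: xs) ys
    else x :: mergeUnique xs ys

-- B's _sorted_unique: split at len//2, recurse, merge
def sortedUnique (vals : List Int) : List Int :=
  if h : vals.length ≤ 1 then vals
  else
    mergeUnique (sortedUnique (vals.take (vals.length / 2)))
      (sortedUnique (vals.drop (vals.length / 2)))
termination_by vals.length
decreasing_by
  · simp only [List.length_take]; omega
  · simp only [List.length_drop]; omega

def normalize_task_indexes_py_alt (raw_indexes : List Int) (total_tasks : Int) : List Int :=
  if total_tasks ≤ 0 then []
  else
    let vals : List Int :=
      raw_indexes.foldl (fun acc raw => if pvInRange total_tasks raw then acc ++ [raw] else acc) []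
    sortedUnique vals

-- ===== PRECONDITION & SPEC =====
def Spec_normalize_task_indexes_py (raw_indexes : List Int) (total_tasks : Int) (out : List Int) : Prop := out = normalize_task_indexes_py_alt raw_indexes total_tasks
instance (raw_indexes : List Int) (total_tasks : Int) (out : List Int) : Decidable (Spec_normalize_task_indexes_py raw_indexes total_tasks out) := by unfold Spec_normalize_task_indexes_py; infer_instance

-- ===== CLAIM =====
def Claim_equal_normalize_task_indexes_py : Prop := ∀ (raw_indexes : List Int) (total_tasks : Int), Dom_normalize_task_indexes_py raw_indexes total_tasks → Spec_normalize_task_indexes_py raw_indexes total_tasks (normalize_task_indexes_py raw_indexes total_tasks)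

-- ===== LEMMAS AND PROOFS =====

-- A's loop: conditionally Set.add-ing over xs is Set-folding over the filtered list
theorem foldl_setAdd_if (p : Int → Bool) (xs : List Int) (s : PySem.Set Int) :
    xs.foldl (fun s r => if p r then PySem.Set.add s r else s) s
      = (xs.filter p).foldl PySem.Set.add s := by
  induction xs generalizing s with
  | nil => rfl
  | cons h t ih => by_cases hp : p h <;> simp [hp, ih]

-- the dedup merge of two strictly increasing lists is strictly increasing and
-- holds exactly the elements of the two inputs
theorem mergeUnique_spec : ∀ (xs ys : List Int), xs.Pairwise (· < ·) → ys.Pairwise (· < ·) →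
    (mergeUnique xs ys).Pairwise (· < ·) ∧ ∀ a, a ∈ mergeUnique xs ys ↔ a ∈ xs ∨ a ∈ ys := by
  intro xs ys hxs hys
  induction xs, ys using mergeUnique.induct with
  | case1 ys => simpa [mergeUnique] using hys
  | case2 x xs => simpa [mergeUnique] using hxs
  | case3 x xs y ys hlt ih =>
    obtain ⟨hp, hm⟩ := ih (List.Pairwise.of_cons hxs) hys
    have hhead : ∀ a ∈ mergeUnique xs (y :: ys), x < a := by
      intro a ha
      rcases (hm a).1 ha with h | h
      · exact (List.pairwise_cons.1 hxs).1 a h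
      · rcases List.mem_cons.1 h with rfl | h
        · exact hlt
        · exact lt_trans hlt ((List.pairwise_cons.1 hys).1 a h)
    constructor
    · simp only [mergeUnique, hlt, if_pos]
      exact List.pairwise_cons.2 ⟨hhead, hp⟩
    · intro a
      simp only [mergeUnique, hlt, if_pos, List.mem_cons, hm a]
      tauto
  | case4 x xs y ys hlt hgt ih =>
    obtain ⟨hp, hm⟩ := ih hxs (List.Pairwise.of_cons hys)
    have hhead : ∀ a ∈ mergeUnique (x :: xs) ys, y < a := by
      intro a ha
      rcases (hm a).1 ha with h | h
      · rcases List.mem_cons.1 h with rfl | h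
        · exact hgt
        · exact lt_trans hgt ((List.pairwise_cons.1 hxs).1 a h)
      · exact (List.pairwise_cons.1 hys).1 a h
    constructor
    · simp only [mergeUnique, hlt, hgt, if_false, if_pos]
      exact List.pairwise_cons.2 ⟨hhead, hp⟩
    · intro a
      simp only [mergeUnique, hlt, hgt, if_false, if_pos, List.mem_cons, hm a]
      tauto
  | case5 x xs y ys hlt hgt ih =>
    have hxy : x = y := le_antisymm (not_lt.1 hgt) (not_lt.1 hlt)
    obtain ⟨hp, hm⟩ := ih (List.Pairwise.of_cons hxs) (List.Pairwise.of_cons hys)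
    have hhead : ∀ a ∈ mergeUnique xs ys, x < a := by
      intro a ha
      rcases (hm a).1 ha with h | h
      · exact (List.pairwise_cons.1 hxs).1 a h
      · exact hxy ▸ (List.pairwise_cons.1 hys).1 a h
    constructor
    · simp only [mergeUnique, hlt, hgt, if_false]
      exact List.pairwise_cons.2 ⟨hhead, hp⟩
    · intro a
      subst hxy
      simp only [mergeUnique, hlt, if_false, List.mem_cons, hm a]
      tauto

-- B's merge sort: the result is strictly increasing and holds exactly the input's elements
theorem sortedUnique_spec : ∀ (vals : List Int),
    (sortedUnique vals).Pairwise (· < ·) ∧ ∀ a, a ∈ sortedUnique vals ↔ a ∈ vals := by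
  intro vals
  induction vals using sortedUnique.induct with
  | case1 vals h =>
    rw [sortedUnique, dif_pos h]
    match vals, h with
    | [], _ => simp
    | [x], _ => simp
  | case2 vals h ih1 ih2 =>
    rw [sortedUnique, dif_neg h]
    obtain ⟨hp1, hm1⟩ := ih1
    obtain ⟨hp2, hm2⟩ := ih2
    obtain ⟨hp, hm⟩ := mergeUnique_spec _ _ hp1 hp2
    refine ⟨hp, fun a => ?_⟩
    rw [hm a, hm1 a, hm2 a, ← List.mem_append, List.take_append_drop]

-- ===== VERDICT (by name: the statement is the Claim_ definition above) =====
theorem normalize_task_indexes_py_spec : Claim_equal_normalize_task_indexes_py := by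
  intro xs T _
  unfold Spec_normalize_task_indexes_py normalize_task_indexes_py normalize_task_indexes_py_alt
  by_cases hT : T ≤ 0
  · simp [hT]
  · simp only [hT, if_false]
    set vals : List Int := xs.filter (pvInRange T) with hvals
    have hA : xs.foldl (fun s raw => if pvInRange T raw then PySem.Set.add s raw else s)
        PySem.Set.empty = PySem.Set.ofList vals := by
      rw [foldl_setAdd_if]; rfl
    have hB : xs.foldl (fun acc raw => if pvInRange T raw then acc ++ [raw] else acc) []
        = vals := by
      have := PySem.List.foldl_append_if (pvInRange T) (fun x => x) xs []
      simpa using this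
    rw [hA, hB]
    obtain ⟨hpw, hmem⟩ := sortedUnique_spec vals
    apply PySem.List.sorted_eq_of_perm_of_pairwise_lt
    · rw [List.perm_ext_iff_of_nodup (hpw.imp ne_of_lt) (PySem.Set.nodup_ofList vals)]
      intro a
      rw [hmem a, PySem.Set.mem_ofList]
    · exact hpw
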